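-- pv_equiv track=rewrite | github.com/mackopes/advent-of-code-2023 | 03/main.py | iter_numbers
-- ===== SOURCE A (Python) =====
-- from typing import Callable, Dict, Generator, List, Tuple
--
-- def iter_numbers(input_line: str) -> Generator[Tuple[int, int, int], None, None]:
--     number = ""
--     start_col = -1
--     for col, char in enumerate(input_line):
--         if char.isdigit():
--             if not number:
--                 start_col = col
--             number += char
--         elif number:
--             yield (start_col, col-1, int(number))
--             number = ""
--             start_col = -1
--     if number:
--         yield (start_col, len(input_line)-1, int(number))
-- ===== SOURCE B (Python) =====
-- def iter_numbers(input_line):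
--     # Two-pointer scan over maximal digit runs: find the start of a run,
--     # advance to its end, yield the span and int value, continue after it.
--     n = len(input_line)
--     i = 0
--     while i < n:
--         if input_line[i].isdigit():
--             j = i
--             while j < n and input_line[j].isdigit():
--                 j += 1
--             yield (i, j - 1, int(input_line[i:j]))
--             i = j
--         else:
--             i += 1
-- ===== Notes on version B (the rewrite author's own statement) =====
-- stated objective: simpler
-- what changed: Replaces A's per-character accumulator-and-flag state machine (running number string, start_col sentinel, post-loop flush) with a two-pointer scan that finds each maximal digit run and yields its span and value directly.
import Mathlib
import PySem

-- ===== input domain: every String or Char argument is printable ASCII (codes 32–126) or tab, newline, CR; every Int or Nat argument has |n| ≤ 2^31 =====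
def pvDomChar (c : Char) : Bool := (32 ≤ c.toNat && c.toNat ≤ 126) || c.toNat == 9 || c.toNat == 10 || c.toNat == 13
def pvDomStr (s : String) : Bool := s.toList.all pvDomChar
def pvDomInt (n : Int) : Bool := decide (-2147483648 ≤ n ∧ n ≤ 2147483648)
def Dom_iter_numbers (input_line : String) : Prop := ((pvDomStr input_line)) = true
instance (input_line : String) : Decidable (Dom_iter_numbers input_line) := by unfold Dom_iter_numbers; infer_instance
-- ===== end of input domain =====

-- B replaces A's per-character accumulator/flag state machine with a two-pointer
-- scan over maximal digit runs (same cost; simpler).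

-- int(number) where number is a nonempty digit string always parses; getD 0 is unreachable.
def pvIntOf (cs : List Char) : Int := (PySem.Int.ofChars? cs).getD 0

-- ===== PORT A =====
-- the for-loop of A: state (number, start_col); col is the enumerate counter,
-- total = len(input_line) for the post-loop flush.
def pvALoop (cs : List Char) (col : Int) (number : List Char) (start_col : Int)
    (total : Int) : List (Int × Int × Int) :=
  match cs with
  | [] => if number.isEmpty then [] else [(start_col, total - 1, pvIntOf number)]
  | c :: rest =>
    if PySem.Chars.isdigit c then
      pvALoop rest (col + 1) (number ++ [c]) (if number.isEmpty then col else start_col) total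
    else if number.isEmpty then
      pvALoop rest (col + 1) number start_col total
    else
      (start_col, col - 1, pvIntOf number) :: pvALoop rest (col + 1) [] (-1) total

def iter_numbers (input_line : String) : List (Int × Int × Int) :=
  pvALoop input_line.toList 0 [] (-1) (input_line.toList.length : Int)

-- ===== PORT B =====
-- Source B's outer while: at a digit, take the maximal run (inner while), emit it,
-- resume after the run; else advance one char.
def pvBGo (cs : List Char) (i : Int) : List (Int × Int × Int) :=
  match cs with
  | [] => []
  | c :: rest =>
    if PySem.Chars.isdigit c then
      let run := (c :: rest).takeWhile PySem.Chars.isdigit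
      (i, i + (run.length : Int) - 1, pvIntOf run)
        :: pvBGo ((c :: rest).dropWhile PySem.Chars.isdigit) (i + (run.length : Int))
    else
      pvBGo rest (i + 1)
termination_by cs.length
decreasing_by
  · simp only [List.dropWhile_cons, *, if_pos]
    exact Nat.lt_succ_of_le (List.length_dropWhile_le _ _)
  · simp

def iter_numbers_alt (input_line : String) : List (Int × Int × Int) :=
  pvBGo input_line.toList 0

-- ===== PRECONDITION & SPEC =====
def Spec_iter_numbers (input_line : String) (out : List (Int × Int × Int)) : Prop := out = iter_numbers_alt input_line
instance (input_line : String) (out : List (Int × Int × Int)) : Decidable (Spec_iter_numbers input_line out) := by unfold Spec_iter_numbers; infer_instance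

-- ===== CLAIM (what is proved, stated in full; the proofs are below) =====
def Claim_equal_iter_numbers : Prop := ∀ (input_line : String), Dom_iter_numbers input_line → Spec_iter_numbers input_line (iter_numbers input_line)

-- ===== LEMMAS AND PROOFS =====

-- A's loop with a pending nonempty number equals: extend the run, emit, continue like B.
-- Combined statement, strong induction on the list length.
theorem pv_main (n : Nat) : ∀ cs : List Char, cs.length ≤ n →
    (∀ col s0, pvALoop cs col [] s0 (col + (cs.length : Int)) = pvBGo cs col) ∧
    (∀ col num start, num ≠ [] → col = start + (num.length : Int) →
      pvALoop cs col num start (col + (cs.length : Int)) =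
        (start, start + (num.length : Int)
            + ((cs.takeWhile PySem.Chars.isdigit).length : Int) - 1,
          pvIntOf (num ++ cs.takeWhile PySem.Chars.isdigit))
          :: pvBGo (cs.dropWhile PySem.Chars.isdigit)
              (col + ((cs.takeWhile PySem.Chars.isdigit).length : Int))) := by
  induction n with
  | zero =>
    intro cs hcs
    have : cs = [] := List.eq_nil_of_length_eq_zero (Nat.le_zero.mp hcs)
    subst this
    constructor
    · intro col s0; simp [pvALoop, pvBGo]
    · intro col num start hne hcol
      simp [pvALoop, pvBGo, hne, List.isEmpty_iff, hcol]
  | succ n ih =>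
    intro cs hcs
    match cs with
    | [] =>
      constructor
      · intro col s0; simp [pvALoop, pvBGo]
      · intro col num start hne hcol
        simp [pvALoop, pvBGo, hne, List.isEmpty_iff, hcol]
    | c :: rest =>
      have hrest : rest.length ≤ n := Nat.lt_succ_iff.mp (by simpa using hcs)
      constructor
      · intro col s0
        by_cases hd : PySem.Chars.isdigit c = true
        · -- first char digit: one A-step creates pending [c]; apply the pending lemma
          have hpend := (ih rest hrest).2 (col + 1) [c] col (by simp) (by simp)
          simp only [pvALoop, hd, if_pos, List.isEmpty_nil, List.nil_append]
          rw [show col + ((c :: rest).length : Int) = (col + 1) + (rest.length : Int) by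
            simp; ring]
          rw [hpend]
          simp only [pvBGo, hd, if_pos, List.takeWhile_cons_of_pos hd,
            List.dropWhile_cons_of_pos hd, List.cons_eq_cons, Prod.mk.injEq,
            List.singleton_append, List.length_cons]
          refine ⟨⟨trivial, by push_cast [List.length_cons, List.length_singleton, List.length_nil]; omega, trivial⟩, ?_⟩
          congr 1; push_cast [List.length_cons, List.length_singleton, List.length_nil]; omega

        · have h0 := (ih rest hrest).1 (col + 1) s0
          simp only [pvALoop, pvBGo, hd, List.isEmpty_nil, if_true, if_false,
            Bool.false_eq_true]
          rw [show col + ((c :: rest).length : Int) = (col + 1) + (rest.length : Int) by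
            simp; ring]
          exact h0
      · intro col num start hne hcol
        by_cases hd : PySem.Chars.isdigit c = true
        · -- digit extends the pending number
          have hpend := (ih rest hrest).2 (col + 1) (num ++ [c]) start
            (by simp) (by simp [hcol]; push_cast; ring)
          have hemp : num.isEmpty = false := by simp [List.isEmpty_iff, hne]
          simp only [pvALoop, hd, if_pos, hemp, Bool.false_eq_true, if_false]
          rw [show col + (((c :: rest).length : Nat) : Int) = (col + 1) + (rest.length : Int) by
            simp only [List.length_cons]; push_cast; ring]
          rw [hpend]
          simp only [List.takeWhile_cons_of_pos hd, List.dropWhile_cons_of_pos hd,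
            List.cons_eq_cons, Prod.mk.injEq, List.length_append, List.length_cons,
            List.length_singleton, List.append_assoc, List.singleton_append]
          refine ⟨⟨trivial, by push_cast [List.length_cons, List.length_singleton, List.length_nil]; omega, trivial⟩, ?_⟩
          congr 1; push_cast [List.length_cons, List.length_singleton, List.length_nil]; omega

        · -- non-digit flushes; tail continues like B from the same position
          have h0 := (ih rest hrest).1 (col + 1) (-1)
          have hemp : num.isEmpty = false := by simp [List.isEmpty_iff, hne]
          simp only [pvALoop, hd, hemp, Bool.false_eq_true, if_false,
            List.takeWhile_cons_of_neg hd, List.dropWhile_cons_of_neg hd]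
          rw [show col + (((c :: rest).length : Nat) : Int) = (col + 1) + (rest.length : Int) by
            simp only [List.length_cons]; push_cast; ring]
          rw [h0]
          simp only [pvBGo, hd, Bool.false_eq_true, if_false, List.cons_eq_cons,
            Prod.mk.injEq, List.takeWhile_nil, List.length_nil, List.append_nil]
          refine ⟨⟨trivial, by push_cast [List.length_cons, List.length_singleton, List.length_nil]; omega, trivial⟩, ?_⟩
          congr 1; push_cast [List.length_cons, List.length_singleton, List.length_nil]; omega


-- ===== VERDICT (by name: the statement is the Claim_ definition above) =====
theorem iter_numbers_spec : Claim_equal_iter_numbers := by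
  intro s _
  unfold Spec_iter_numbers iter_numbers iter_numbers_alt
  simpa using (pv_main s.toList.length s.toList le_rfl).1 0 (-1)
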